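-- pv_equiv track=rewrite | github.com/nikolay777-ops/MZI | lab-6/gost3410.py | split_string_into_blocks
-- ===== SOURCE A (Python) =====
-- def split_string_into_blocks(input_string, block_size_bits):
--     """Делим всё по 256 бит"""
--     blocks = []
--     current_block = ""
--
--     for char in input_string:
--         char_binary = bin(int(char, 16))[2:].zfill(16)
--         current_block += char_binary
--
--         if len(current_block) >= block_size_bits:
--             blocks.append(int(current_block, 2))
--             current_block = ""
--
--     if current_block:
--         blocks.append(int(current_block, 2))
--
--     return blocks, len(current_block)
-- ===== SOURCE B (Python) =====
-- def _chunk_value(chunk):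
--     v = 0
--     for c in chunk:
--         v = v * 65536 + int(c, 16)
--     return v
--
--
-- def split_string_into_blocks(input_string, block_size_bits):
--     """Chunking pass: ceil(block_size_bits/16) hex chars per block, base-65536 arithmetic."""
--     k = max(1, -(-block_size_bits // 16))
--     blocks = []
--     i = 0
--     n = len(input_string)
--     while i + k <= n:
--         blocks.append(_chunk_value(input_string[i:i + k]))
--         i += k
--     rest = input_string[i:]
--     if rest:
--         blocks.append(_chunk_value(rest))
--     return blocks, 16 * len(rest)
-- ===== Notes on version B (the rewrite author's own statement) =====
-- stated objective: alternative
-- what changed: Replaces A's per-character binary-string accumulate-and-flush loop (building '0'/'1' strings with bin/zfill and reparsing them with int(x,2)) by a direct chunking pass: compute k = max(1, ceil(block_size_bits/16)) once, slice the input into k-character chunks and evaluate each chunk arithmetically in base 65536.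
import Mathlib
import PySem

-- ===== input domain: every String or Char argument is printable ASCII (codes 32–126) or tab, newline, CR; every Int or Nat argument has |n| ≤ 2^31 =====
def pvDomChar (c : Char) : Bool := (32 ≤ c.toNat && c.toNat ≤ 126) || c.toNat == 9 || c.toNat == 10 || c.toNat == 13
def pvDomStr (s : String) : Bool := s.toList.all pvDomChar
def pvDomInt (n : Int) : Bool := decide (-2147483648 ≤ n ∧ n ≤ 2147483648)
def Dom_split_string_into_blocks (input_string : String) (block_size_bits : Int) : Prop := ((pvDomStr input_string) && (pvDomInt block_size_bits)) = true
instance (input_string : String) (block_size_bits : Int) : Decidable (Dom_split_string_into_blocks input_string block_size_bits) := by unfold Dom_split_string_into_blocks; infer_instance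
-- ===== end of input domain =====

-- B replaces A's bit-string accumulate-and-flush loop by an explicit chunking pass
-- (ceil(block_size_bits/16) hex chars per block, base-65536 arithmetic, no binary strings).

-- ===== PORT A =====

-- int(c, 16) digit value: some v for hex digits, none where Python raises ValueError (excluded by Pre_)
def pvHexDigit? (c : Char) : Option Nat :=
  if 48 ≤ c.toNat ∧ c.toNat ≤ 57 then some (c.toNat - 48)
  else if 97 ≤ c.toNat ∧ c.toNat ≤ 102 then some (c.toNat - 87)
  else if 65 ≤ c.toNat ∧ c.toNat ≤ 70 then some (c.toNat - 55)
  else none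

def pvHexVal (c : Char) : Nat := (pvHexDigit? c).getD 0

-- bin(n)[2:] (exact for n ≥ 0, the only case reached; Nat.toDigits 2 is binary, MSB first, '0' for 0)
def pvBinStr (n : Nat) : List Char := Nat.toDigits 2 n

-- str.zfill(16) on a digit string
def pvZfill16 (l : List Char) : List Char := List.replicate (16 - l.length) '0' ++ l

-- bin(int(char,16))[2:].zfill(16)
def pvBin16 (c : Char) : List Char := pvZfill16 (pvBinStr (pvHexVal c))

-- int(x, 2) (exact on '0'/'1' strings, the only strings A builds)
def pvParseBin (l : List Char) : Int := l.foldl (fun a c => 2 * a + (if c = '1' then 1 else 0)) 0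

-- A's for-loop, state = (blocks, current_block)
def pvLoopA (bsb : Int) : List Int → List Char → List Char → List Int × List Char
  | blocks, cur, [] => (blocks, cur)
  | blocks, cur, c :: cs =>
    let bits := cur ++ pvBin16 c
    if (bits.length : Int) ≥ bsb then pvLoopA bsb (blocks ++ [pvParseBin bits]) [] cs
    else pvLoopA bsb blocks bits cs

def split_string_into_blocks (input_string : String) (block_size_bits : Int) : List Int × Int :=
  let r := pvLoopA block_size_bits [] [] input_string.toList
  ((if r.2 ≠ [] then r.1 ++ [pvParseBin r.2] else r.1), (r.2.length : Int))

-- ===== PORT B =====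

-- _chunk_value: v = 0; for c in chunk: v = v*65536 + int(c,16)
def pvChunkVal (cs : List Char) : Int := cs.foldl (fun a c => a * 65536 + (pvHexVal c : Int)) 0

-- B's while loop over slices of k chars, then the leftover slice
def pvChunksB (k : Nat) (cs : List Char) : List Int × Int :=
  if cs = [] then ([], 0)
  else if k ≤ cs.length ∧ 0 < k then
    let r := pvChunksB k (cs.drop k)
    (pvChunkVal (cs.take k) :: r.1, r.2)
  else ([pvChunkVal cs], 16 * (cs.length : Int))
  termination_by cs.length
  decreasing_by simp_all; omega

def split_string_into_blocks_alt (input_string : String) (block_size_bits : Int) : List Int × Int :=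
  let k := max 1 (-(PySem.Int.floordiv (-block_size_bits) 16))
  pvChunksB k.toNat input_string.toList

-- ===== PRECONDITION & SPEC =====
-- Pre_ excludes exactly the inputs where A raises ValueError: any character that is not a hex digit.
def Pre_split_string_into_blocks (input_string : String) (block_size_bits : Int) : Prop :=
  (input_string.toList.all fun c =>
    ((48 ≤ c.toNat && c.toNat ≤ 57) || (97 ≤ c.toNat && c.toNat ≤ 102) || (65 ≤ c.toNat && c.toNat ≤ 70))) = true
instance (input_string : String) (block_size_bits : Int) : Decidable (Pre_split_string_into_blocks input_string block_size_bits) := by unfold Pre_split_string_into_blocks; infer_instance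

def pvWitness_split_string_into_blocks : String × Int := ("1a", 16)

def Spec_split_string_into_blocks (input_string : String) (block_size_bits : Int) (out : List Int × Int) : Prop := out = split_string_into_blocks_alt input_string block_size_bits
instance (input_string : String) (block_size_bits : Int) (out : List Int × Int) : Decidable (Spec_split_string_into_blocks input_string block_size_bits out) := by unfold Spec_split_string_into_blocks; infer_instance

-- ===== CLAIM (what is proved, stated in full; the proofs are below) =====
def Claim_equal_split_string_into_blocks : Prop := ∀ (input_string : String) (block_size_bits : Int), Dom_split_string_into_blocks input_string block_size_bits → Pre_split_string_into_blocks input_string block_size_bits → Spec_split_string_into_blocks input_string block_size_bits (split_string_into_blocks input_string block_size_bits)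

-- ===== LEMMAS AND PROOFS =====

theorem pvHexVal_lt (c : Char) : pvHexVal c < 16 := by
  unfold pvHexVal pvHexDigit?; split_ifs <;> simp <;> omega

theorem pvParseBin_foldl (l : List Char) (a : Int) :
    l.foldl (fun a c => 2 * a + (if c = '1' then 1 else 0)) a
      = a * 2 ^ l.length + pvParseBin l := by
  induction l generalizing a with
  | nil => simp [pvParseBin]
  | cons c l ih =>
    simp only [List.foldl_cons, List.length_cons, pvParseBin]
    rw [ih, ih ((2 : Int) * 0 + (if c = '1' then 1 else 0))]
    ring

theorem pvParseBin_append (a b : List Char) :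
    pvParseBin (a ++ b) = pvParseBin a * 2 ^ b.length + pvParseBin b := by
  unfold pvParseBin
  rw [List.foldl_append, pvParseBin_foldl]
  rfl

theorem pvBin16_length (c : Char) : (pvBin16 c).length = 16 := by
  have h := pvHexVal_lt c
  unfold pvBin16
  interval_cases h : pvHexVal c <;> decide

theorem pvParseBin_pvBin16 (c : Char) : pvParseBin (pvBin16 c) = (pvHexVal c : Int) := by
  have h := pvHexVal_lt c
  unfold pvBin16
  interval_cases h : pvHexVal c <;> decide

-- bits accumulated for the pending characters pc
def pvBitsOf (pc : List Char) : List Char := (pc.map pvBin16).flatten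

theorem pvBitsOf_length (pc : List Char) : (pvBitsOf pc).length = 16 * pc.length := by
  induction pc with
  | nil => simp [pvBitsOf]
  | cons c pc ih =>
    simp [pvBitsOf, pvBin16_length c] at *
    omega

theorem pvBitsOf_append_one (pc : List Char) (c : Char) :
    pvBitsOf pc ++ pvBin16 c = pvBitsOf (pc ++ [c]) := by
  simp [pvBitsOf]

theorem pvParseBin_pvBitsOf (pc : List Char) : pvParseBin (pvBitsOf pc) = pvChunkVal pc := by
  induction pc using List.reverseRecOn with
  | nil => decide
  | append_singleton pc c ih =>
    rw [← pvBitsOf_append_one, pvParseBin_append, pvBin16_length, pvParseBin_pvBin16, ih]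
    unfold pvChunkVal
    rw [List.foldl_append]
    norm_num

theorem pvBitsOf_ne_nil (pc : List Char) (h : pc ≠ []) : pvBitsOf pc ≠ [] := by
  intro hb
  have := pvBitsOf_length pc
  rw [hb] at this
  simp at this
  exact h this

-- the flush condition of A matches "j+1 pending chars fill a chunk of k = max 1 ⌈bsb/16⌉"
theorem pvFlushIff (bsb : Int) (j : Nat) :
    ((16 * ((j : Int) + 1)) ≥ bsb ↔ (j + 1 : Int) ≥ max 1 (-(PySem.Int.floordiv (-bsb) 16))) := by
  have h := PySem.Int.floordiv_mul_add_mod (-bsb) 16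
  have h0 : 0 ≤ PySem.Int.mod (-bsb) 16 := by
    have := PySem.Int.mod_eq_emod_of_pos (a := -bsb) (b := 16) (by norm_num)
    rw [this]; exact Int.emod_nonneg _ (by norm_num)
  have h1 : PySem.Int.mod (-bsb) 16 < 16 := by
    have := PySem.Int.mod_eq_emod_of_pos (a := -bsb) (b := 16) (by norm_num)
    rw [this]; exact Int.emod_lt_of_pos _ (by norm_num)
  omega

-- one Nat-side corollary in the form the main induction needs
theorem pvFlushIffNat (bsb : Int) (j : Nat) :
    (((16 * (j + 1) : Nat) : Int) ≥ bsb ↔ (max 1 (-(PySem.Int.floordiv (-bsb) 16))).toNat ≤ j + 1) := by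
  have h := pvFlushIff bsb j
  have hk : (1 : Int) ≤ max 1 (-(PySem.Int.floordiv (-bsb) 16)) := le_max_left _ _
  push_cast
  constructor
  · intro hh
    have := h.mp (by linarith)
    omega
  · intro hh
    have : (j + 1 : Int) ≥ max 1 (-(PySem.Int.floordiv (-bsb) 16)) := by omega
    have := h.mpr this
    linarith

-- the post-loop finalization of A
def pvFinal (r : List Int × List Char) : List Int × Int :=
  ((if r.2 ≠ [] then r.1 ++ [pvParseBin r.2] else r.1), (r.2.length : Int))

theorem pvLoopA_chunks (bsb : Int) (cs pc : List Char) (blocks : List Int)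
    (hk : pc.length < (max 1 (-(PySem.Int.floordiv (-bsb) 16))).toNat) :
    pvFinal (pvLoopA bsb blocks (pvBitsOf pc) cs)
      = (blocks ++ (pvChunksB (max 1 (-(PySem.Int.floordiv (-bsb) 16))).toNat (pc ++ cs)).1,
         (pvChunksB (max 1 (-(PySem.Int.floordiv (-bsb) 16))).toNat (pc ++ cs)).2) := by
  set k := (max 1 (-(PySem.Int.floordiv (-bsb) 16))).toNat with hkdef
  have hk1 : 1 ≤ k := by
    have : (1 : Int) ≤ max 1 (-(PySem.Int.floordiv (-bsb) 16)) := le_max_left _ _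
    omega
  induction cs generalizing pc blocks with
  | nil =>
    simp only [pvLoopA, List.append_nil]
    by_cases hpc : pc = []
    · subst hpc
      simp [pvFinal, pvBitsOf, pvChunksB]
    · have hne := pvBitsOf_ne_nil pc hpc
      rw [pvChunksB]
      have hnk : ¬ (k ≤ pc.length ∧ 0 < k) := by omega
      simp only [if_neg hpc, if_neg hnk]
      simp [pvFinal, hne, pvParseBin_pvBitsOf, pvBitsOf_length]
  | cons c cs ih =>
    simp only [pvLoopA]
    rw [pvBitsOf_append_one]
    have hlen : (pvBitsOf (pc ++ [c])).length = 16 * (pc.length + 1) := by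
      rw [pvBitsOf_length]; simp
    by_cases hfl : ((pvBitsOf (pc ++ [c])).length : Int) ≥ bsb
    · -- flush: pc ++ [c] is a full chunk, i.e. pc.length + 1 = k
      have : k ≤ pc.length + 1 := by
        have := (pvFlushIffNat bsb pc.length).mp (by rw [hlen] at hfl; exact_mod_cast hfl)
        omega
      have hke : pc.length + 1 = k := by omega
      rw [if_pos hfl]
      have hih := ih [] (blocks ++ [pvParseBin (pvBitsOf (pc ++ [c]))]) (by simpa [pvBitsOf] using hk1)
      have hsplit : pc ++ c :: cs = (pc ++ [c]) ++ cs := by simp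
      have hne2 : (pc ++ [c]) ++ cs ≠ [] := by simp
      have hle : k ≤ ((pc ++ [c]) ++ cs).length ∧ 0 < k := by
        simp; omega
      have htake : ((pc ++ [c]) ++ cs).take k = pc ++ [c] := by
        rw [List.take_append_of_le_length (by simp [hke])]
        rw [List.take_of_length_le (by simp [hke])]
      have hdrop : ((pc ++ [c]) ++ cs).drop k = cs := by
        rw [List.drop_append_of_le_length (by simp [hke])]
        rw [List.drop_of_length_le (by simp [hke]), List.nil_append]
      rw [hsplit]
      conv_rhs => rw [pvChunksB]
      rw [if_neg hne2, if_pos hle, htake, hdrop]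
      have hv := pvParseBin_pvBitsOf (pc ++ [c])
      simp only [pvBitsOf, List.map_nil, List.flatten_nil, List.nil_append] at hih hv ⊢
      rw [hih, hv]
      simp
    · -- no flush: pc ++ [c] still pending, pc.length + 1 < k
      have hlt : pc.length + 1 < k := by
        have := (pvFlushIffNat bsb pc.length)
        rw [hlen] at hfl
        have : ¬ k ≤ pc.length + 1 := by
          intro hcon
          exact hfl (by exact_mod_cast this.mpr hcon)
        omega
      rw [if_neg hfl]
      rw [ih (pc ++ [c]) blocks (by simpa using hlt)]
      simp

-- ===== VERDICT (by name: the statement is the Claim_ definition above) =====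
theorem split_string_into_blocks_spec : Claim_equal_split_string_into_blocks := by
  intro s bsb _ _
  unfold Spec_split_string_into_blocks split_string_into_blocks split_string_into_blocks_alt
  have hk1 : 1 ≤ (max 1 (-(PySem.Int.floordiv (-bsb) 16))).toNat := by
    have : (1 : Int) ≤ max 1 (-(PySem.Int.floordiv (-bsb) 16)) := le_max_left _ _
    omega
  have h := pvLoopA_chunks bsb s.toList [] [] (by simp [hk1])
  simp only [pvBitsOf, List.map_nil, List.flatten_nil, List.nil_append] at h
  have : pvFinal (pvLoopA bsb [] [] s.toList) = split_string_into_blocks s bsb := by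
    unfold split_string_into_blocks pvFinal; rfl
  rw [this] at h
  rw [show split_string_into_blocks s bsb
      = ((if (pvLoopA bsb [] [] s.toList).2 ≠ [] then (pvLoopA bsb [] [] s.toList).1 ++ [pvParseBin (pvLoopA bsb [] [] s.toList).2] else (pvLoopA bsb [] [] s.toList).1),
         ((pvLoopA bsb [] [] s.toList).2.length : Int)) from rfl] at *
  simpa using h
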